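-- pv_equiv track=rewrite | github.com/UDC-GAC/ServerlessContainers | src/Scaler/Scaler.py | split_requests_by_action
-- ===== SOURCE A (Python) =====
-- def split_requests_by_action(all_requests):
--     # Sort requests by priority. This is important for prioritizing requests of different structures
--     # Example: ReBalancer requests to scale down container1 and scale up container2, while Guardian requests to
--     # scale up both containers. The scaling down of container1 is executed first. Then, if no priority order is
--     # enforced, the scaling up of container1 could be executed before the scaling up of container2, thus making
--     # the ReBalancer scale down request useless
--     sorted_requests = sorted(all_requests, key=lambda r: r.get("priority", 0), reverse=True)
--     scale_down, scale_up = [], []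
--     for request in sorted_requests:
--         if not request.get("action", None):
--             continue
--         elif request["action"].endswith("Down"):
--             scale_down.append(request)
--         elif request["action"].endswith("Up"):
--             scale_up.append(request)
--     return scale_down, scale_up
-- ===== SOURCE B (Python) =====
-- def split_requests_by_action(all_requests):
--     # Two independent filtered sorts: no partition loop at all.  A request's
--     # action cannot end with both "Down" and "Up", so the two filters are
--     # disjoint and together reproduce A's elif chain; the stable reverse sort
--     # by priority gives the same order as sorting first.
--     def ends(r, suf):
--         a = r.get("action", None)
--         return bool(a) and a.endswith(suf)
--     key = lambda r: r.get("priority", 0)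
--     return (sorted((r for r in all_requests if ends(r, "Down")), key=key, reverse=True),
--             sorted((r for r in all_requests if ends(r, "Up")), key=key, reverse=True))
-- ===== Notes on version B (the rewrite author's own statement) =====
-- stated objective: alternative
-- what changed: B replaces A's sort-everything-then-partition loop by two independent filtered sorts (filter the requests whose action ends with 'Down' resp. 'Up', then stably sort each by priority); no partition loop or accumulator pair exists in B.
import Mathlib
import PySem

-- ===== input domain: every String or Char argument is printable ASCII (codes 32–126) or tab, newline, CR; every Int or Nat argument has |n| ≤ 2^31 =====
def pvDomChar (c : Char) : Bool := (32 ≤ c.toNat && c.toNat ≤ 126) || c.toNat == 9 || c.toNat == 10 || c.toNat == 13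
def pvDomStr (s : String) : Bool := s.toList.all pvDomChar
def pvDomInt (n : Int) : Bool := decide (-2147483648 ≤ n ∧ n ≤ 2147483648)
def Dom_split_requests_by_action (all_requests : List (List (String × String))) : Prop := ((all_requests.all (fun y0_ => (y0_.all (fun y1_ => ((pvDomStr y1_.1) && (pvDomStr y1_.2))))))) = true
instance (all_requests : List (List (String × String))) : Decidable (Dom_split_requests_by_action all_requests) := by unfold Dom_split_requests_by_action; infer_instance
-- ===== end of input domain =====

-- B replaces A's sort-then-partition loop by two independent filtered sorts ("alternative",
-- same cost): an action cannot end with both "Down" and "Up", so the filters are disjoint,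
-- and the stable reverse sort by priority commutes with filtering.
-- NOTE on the ports: Python's r.get("priority", 0) defaults to the int 0, which has no String
-- representative; under Pre_ either every request has a "priority" key (the default is never
-- produced) or none has (the key is constant, and any constant default — "" here — leaves a
-- stable reverse sort as the identity), so defaulting to "" is exact on Pre_.

-- ===== PORT A =====
def split_requests_by_action (all_requests : List (List (String × String))) : (List (List (String × String))) × (List (List (String × String))) :=
  let sorted_requests := PySem.List.sorted all_requests (fun r => (PySem.Dict.ofList r).getD "priority" "") true
  sorted_requests.foldl
    (fun (acc : List (List (String × String)) × List (List (String × String))) request =>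
      match (PySem.Dict.ofList request).get? "action" with
      | none => acc
      | some action =>
        if action = "" then acc
        else if PySem.Str.endswith action "Down" then (acc.1 ++ [request], acc.2)
        else if PySem.Str.endswith action "Up" then (acc.1, acc.2 ++ [request])
        else acc)
    ([], [])

-- ===== PORT B =====
-- Source B's helper `ends(r, suf)`: the action exists, is truthy, and ends with suf
def pvEnds (r : List (String × String)) (suf : String) : Bool :=
  match (PySem.Dict.ofList r).get? "action" with
  | none => false
  | some a => !(a = "") && PySem.Str.endswith a suf

def split_requests_by_action_alt (all_requests : List (List (String × String))) : (List (List (String × String))) × (List (List (String × String))) :=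
  let key := fun r => (PySem.Dict.ofList r).getD "priority" ""
  (PySem.List.sorted (all_requests.filter (fun r => pvEnds r "Down")) key true,
   PySem.List.sorted (all_requests.filter (fun r => pvEnds r "Up")) key true)

-- ===== PRECONDITION & SPEC =====
-- Pre_ excludes exactly the lists mixing requests with and without a "priority" key
-- (with ≥ 2 requests), on which Python's sorted compares a str priority with the int
-- default 0 and raises TypeError.
def Pre_split_requests_by_action (all_requests : List (List (String × String))) : Prop :=
  (∀ r ∈ all_requests, (PySem.Dict.ofList r).contains "priority" = true) ∨
  (∀ r ∈ all_requests, (PySem.Dict.ofList r).contains "priority" = false)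
instance (all_requests : List (List (String × String))) : Decidable (Pre_split_requests_by_action all_requests) := by unfold Pre_split_requests_by_action; infer_instance

def pvWitness_split_requests_by_action : (List (List (String × String))) :=
  [[("action", "ScaleDown")], [("action", "ScaleUp"), ("host", "c1")], [("action", "")]]

def Spec_split_requests_by_action (all_requests : List (List (String × String))) (out : (List (List (String × String))) × (List (List (String × String)))) : Prop := out = split_requests_by_action_alt all_requests
instance (all_requests : List (List (String × String))) (out : (List (List (String × String))) × (List (List (String × String)))) : Decidable (Spec_split_requests_by_action all_requests out) := by unfold Spec_split_requests_by_action; infer_instance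

-- ===== CLAIM (what is proved, stated in full; the proofs are below) =====
def Claim_equal_split_requests_by_action : Prop := ∀ (all_requests : List (List (String × String))), Dom_split_requests_by_action all_requests → Pre_split_requests_by_action all_requests → Spec_split_requests_by_action all_requests (split_requests_by_action all_requests)

-- ===== LEMMAS AND PROOFS =====

-- the loop body A's port inlines (definitionally equal to its lambda)
def pvStep (acc : List (List (String × String)) × List (List (String × String)))
    (request : List (String × String)) :
    List (List (String × String)) × List (List (String × String)) :=
  match (PySem.Dict.ofList request).get? "action" with
  | none => acc
  | some action =>
    if action = "" then acc
    else if PySem.Str.endswith action "Down" then (acc.1 ++ [request], acc.2)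
    else if PySem.Str.endswith action "Up" then (acc.1, acc.2 ++ [request])
    else acc

-- the two branch predicates of that loop body
def pvDown (r : List (String × String)) : Bool :=
  match (PySem.Dict.ofList r).get? "action" with
  | none => false
  | some a => !(a = "") && PySem.Str.endswith a "Down"

def pvUp (r : List (String × String)) : Bool :=
  match (PySem.Dict.ofList r).get? "action" with
  | none => false
  | some a => !(a = "") && !(PySem.Str.endswith a "Down") && PySem.Str.endswith a "Up"

-- A string cannot end with both "Down" and "Up"
theorem pvNot_both (a : String) (h : PySem.Str.endswith a "Up" = true) :
    PySem.Str.endswith a "Down" = false := by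
  by_contra hd
  rw [Bool.not_eq_false] at hd
  simp only [PySem.Str.endswith_eq] at h hd
  have hu' := (PySem.Chars.endswith_iff _ _).mp h
  have hd' := (PySem.Chars.endswith_iff _ _).mp hd
  rcases List.suffix_or_suffix_of_suffix hu' hd' with hc | hc
  · revert hc; decide
  · revert hc; decide

-- A's elif branch predicates coincide with Source B's `ends`
theorem pvDown_eq (r : List (String × String)) : pvDown r = pvEnds r "Down" := rfl

theorem pvUp_eq (r : List (String × String)) : pvUp r = pvEnds r "Up" := by
  unfold pvUp pvEnds
  cases h : (PySem.Dict.ofList r).get? "action" with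
  | none => rfl
  | some a =>
    by_cases hu : PySem.Chars.endswith a.toList ['U','p'] = true
    · have hd := pvNot_both a (by simpa using hu)
      have hd' : PySem.Chars.endswith a.toList ['D','o','w','n'] = false := by
        simpa using hd
      simp [hu, hd']
    · simp [hu]

-- the partitioning loop is the pair of filters by pvDown / pvUp
theorem pvFoldl_split (l : List (List (String × String)))
    (d u : List (List (String × String))) :
    List.foldl pvStep (d, u) l = (d ++ l.filter pvDown, u ++ l.filter pvUp) := by
  induction l generalizing d u with
  | nil => simp
  | cons r t ih =>
    rw [List.foldl_cons]
    cases h : (PySem.Dict.ofList r).get? "action" with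
    | none =>
      rw [show pvStep (d, u) r = (d, u) from by simp [pvStep, h], ih]
      simp [pvDown, pvUp, h]
    | some a =>
      by_cases he : a = ""
      · rw [show pvStep (d, u) r = (d, u) from by simp [pvStep, h, he], ih]
        simp [pvDown, pvUp, h, he]
      · by_cases hd : PySem.Chars.endswith a.toList ['D','o','w','n']
        · rw [show pvStep (d, u) r = (d ++ [r], u) from by simp [pvStep, h, he, hd], ih]
          simp [pvDown, pvUp, h, he, hd]
        · by_cases hu : PySem.Chars.endswith a.toList ['U','p']
          · rw [show pvStep (d, u) r = (d, u ++ [r]) from by simp [pvStep, h, he, hd, hu], ih]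
            simp [pvDown, pvUp, h, he, hd, hu]
          · rw [show pvStep (d, u) r = (d, u) from by simp [pvStep, h, he, hd, hu], ih]
            simp [pvDown, pvUp, h, he, hd, hu]

theorem pvInsertBy_cons {α κ : Type} [LinearOrder κ] (key : α → κ) (x : α) (l : List α)
    (h : ∀ z ∈ l, key z < key x) :
    PySem.List.insertBy (fun a b => decide (key b < key a)) x l = x :: l := by
  cases l with
  | nil => simp [PySem.List.insertBy]
  | cons y ys => simp [PySem.List.insertBy, h y (List.mem_cons_self ..)]

theorem pvInsertBy_cons_of_ge {α κ : Type} [LinearOrder κ] (key : α → κ) (x y : α)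
    (ys : List α) (h : ¬ key y < key x) :
    PySem.List.insertBy (fun a b => decide (key b < key a)) x (y :: ys) =
      y :: PySem.List.insertBy (fun a b => decide (key b < key a)) x ys := by
  simp [PySem.List.insertBy, h]

theorem pvPairwise_insertBy {α κ : Type} [LinearOrder κ] (key : α → κ) (x : α) (l : List α)
    (h : l.Pairwise (fun a b => key b ≤ key a)) :
    (PySem.List.insertBy (fun a b => decide (key b < key a)) x l).Pairwise
      (fun a b => key b ≤ key a) := by
  induction l with
  | nil => simp [PySem.List.insertBy]
  | cons y ys ih =>
    rcases List.pairwise_cons.mp h with ⟨hy, hys⟩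
    by_cases hc : key y < key x
    · rw [pvInsertBy_cons key x (y :: ys) ?_]
      · refine List.pairwise_cons.mpr ⟨?_, h⟩
        intro z hz
        rcases List.mem_cons.mp hz with rfl | hz
        · exact le_of_lt hc
        · exact le_trans (hy z hz) (le_of_lt hc)
      · intro z hz
        rcases List.mem_cons.mp hz with rfl | hz
        · exact hc
        · exact lt_of_le_of_lt (hy z hz) hc
    · rw [pvInsertBy_cons_of_ge key x y ys hc]
      refine List.pairwise_cons.mpr ⟨?_, ih hys⟩
      intro z hz
      rcases (PySem.List.mem_insertBy ..).mp hz with rfl | hz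
      · exact le_of_not_gt hc
      · exact hy z hz

theorem pvFilter_insertBy {α κ : Type} [LinearOrder κ] (key : α → κ) (p : α → Bool) (x : α)
    (l : List α) (h : l.Pairwise (fun a b => key b ≤ key a)) :
    (PySem.List.insertBy (fun a b => decide (key b < key a)) x l).filter p =
      if p x then PySem.List.insertBy (fun a b => decide (key b < key a)) x (l.filter p)
      else l.filter p := by
  induction l with
  | nil =>
    by_cases hp : p x <;> simp [PySem.List.insertBy, hp]
  | cons y ys ih =>
    rcases List.pairwise_cons.mp h with ⟨hy, hys⟩
    by_cases hc : key y < key x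
    · rw [pvInsertBy_cons key x (y :: ys) ?_]
      · by_cases hp : p x
        · rw [if_pos hp, pvInsertBy_cons key x ((y :: ys).filter p) ?_]
          · rw [List.filter_cons, if_pos hp]
          · intro z hz
            rcases List.mem_cons.mp (List.mem_of_mem_filter hz) with rfl | hz2
            · exact hc
            · exact lt_of_le_of_lt (hy z hz2) hc
        · rw [if_neg hp, List.filter_cons, if_neg hp]
      · intro z hz
        rcases List.mem_cons.mp hz with rfl | hz
        · exact hc
        · exact lt_of_le_of_lt (hy z hz) hc
    · rw [pvInsertBy_cons_of_ge key x y ys hc, List.filter_cons, List.filter_cons, ih hys]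
      by_cases hq : p y
      · rw [if_pos hq, if_pos hq]
        by_cases hp : p x
        · rw [if_pos hp, if_pos hp, pvInsertBy_cons_of_ge key x y (ys.filter p) hc]
        · rw [if_neg hp, if_neg hp]
      · rw [if_neg hq, if_neg hq]

theorem pvSorted_foldl_filter {α κ : Type} [LinearOrder κ] (key : α → κ) (p : α → Bool)
    (xs : List α) (acc : List α) (hacc : acc.Pairwise (fun a b => key b ≤ key a)) :
    (xs.foldl (fun acc x => PySem.List.insertBy (fun a b => decide (key b < key a)) x acc) acc).filter p =
      (xs.filter p).foldl (fun acc x => PySem.List.insertBy (fun a b => decide (key b < key a)) x acc) (acc.filter p) := by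
  induction xs generalizing acc with
  | nil => simp
  | cons x t ih =>
    rw [List.foldl_cons, List.filter_cons,
        ih _ (pvPairwise_insertBy key x acc hacc),
        pvFilter_insertBy key p x acc hacc]
    by_cases hp : p x
    · rw [if_pos hp, if_pos hp, List.foldl_cons]
    · rw [if_neg hp, if_neg hp]

-- a stable reverse sort commutes with filtering
theorem pvSorted_filter {α κ : Type} [LinearOrder κ] (key : α → κ) (p : α → Bool) (xs : List α) :
    (PySem.List.sorted xs key true).filter p =
      PySem.List.sorted (xs.filter p) key true := by
  rw [PySem.List.sorted_rev_eq_foldl_insertBy, PySem.List.sorted_rev_eq_foldl_insertBy]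
  simpa using pvSorted_foldl_filter key p xs [] (by simp)

-- ===== VERDICT (by name: the statement is the Claim_ definition above) =====
theorem split_requests_by_action_spec : Claim_equal_split_requests_by_action := by
  intro all_requests _ _
  show List.foldl pvStep ([], [])
        (PySem.List.sorted all_requests (fun r => (PySem.Dict.ofList r).getD "priority" "") true) =
      (PySem.List.sorted (all_requests.filter (fun r => pvEnds r "Down"))
         (fun r => (PySem.Dict.ofList r).getD "priority" "") true,
       PySem.List.sorted (all_requests.filter (fun r => pvEnds r "Up"))
         (fun r => (PySem.Dict.ofList r).getD "priority" "") true)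
  rw [pvFoldl_split]
  simp only [List.nil_append]
  rw [pvSorted_filter, pvSorted_filter,
      show (pvDown : List (String × String) → Bool) = fun r => pvEnds r "Down" from funext pvDown_eq,
      show (pvUp : List (String × String) → Bool) = fun r => pvEnds r "Up" from funext pvUp_eq]
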